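-- pv_equiv track=rewrite | github.com/lourencomaciel/sift-gateway | benchmarks/tier1/questions.py | _users_most_common_city
-- ===== SOURCE A (Python) =====
-- from collections import Counter
-- from typing import Any
--
-- def _users_most_common_city(data: Any) -> str:
--     cities: list[str] = []
--     for u in data:
--         if not isinstance(u, dict):
--             continue
--         addr = u.get("address")
--         if isinstance(addr, dict) and isinstance(addr.get("city"), str):
--             cities.append(addr["city"])
--     if not cities:
--         return ""
--     return Counter(cities).most_common(1)[0][0]
-- ===== SOURCE B (Python) =====
-- def _users_most_common_city(data) -> str:
--     cities = [
--         u["address"]["city"]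
--         for u in data
--         if isinstance(u, dict)
--         and isinstance(u.get("address"), dict)
--         and isinstance(u["address"].get("city"), str)
--     ]
--     best, best_n = "", 0
--     for c in cities:
--         n = cities.count(c)
--         if n > best_n:
--             best, best_n = c, n
--     return best
-- ===== Notes on version B (the rewrite author's own statement) =====
-- stated objective: alternative
-- what changed: B drops the Counter/most_common frequency table entirely: it gathers the valid cities with a comprehension and picks the winner by a brute-force argmax that recounts each occurrence's city with list.count, the strict '>' update reproducing most_common(1)'s first-occurrence tie-break without any dict or sort.
import Mathlib
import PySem

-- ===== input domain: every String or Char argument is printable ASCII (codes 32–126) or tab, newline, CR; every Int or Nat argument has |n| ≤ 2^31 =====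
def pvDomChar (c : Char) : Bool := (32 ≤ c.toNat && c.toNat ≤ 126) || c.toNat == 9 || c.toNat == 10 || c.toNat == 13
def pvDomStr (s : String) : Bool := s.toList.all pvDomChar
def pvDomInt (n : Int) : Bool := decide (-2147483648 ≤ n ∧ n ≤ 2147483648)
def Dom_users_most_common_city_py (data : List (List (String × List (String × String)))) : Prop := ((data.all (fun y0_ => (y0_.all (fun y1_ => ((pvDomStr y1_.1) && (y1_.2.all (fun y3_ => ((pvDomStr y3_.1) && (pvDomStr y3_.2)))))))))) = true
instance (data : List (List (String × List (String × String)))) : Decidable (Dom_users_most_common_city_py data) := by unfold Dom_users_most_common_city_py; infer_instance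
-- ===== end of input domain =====

-- B replaces A's list+Counter+most_common(1) pipeline with a comprehension and a brute-force
-- strict-greater argmax that recounts each occurrence via list.count (objective: alternative).

-- ===== PORT A =====
-- A builds a list of cities (the isinstance(u, dict) test is always true under this type;
-- addr is a dict exactly when "address" is present; addr["city"] is the matched value),
-- then Counter(cities).most_common(1)[0][0]: most_common(1) is the head of the items
-- stably sorted by count in reverse (CPython's documented nlargest equivalence).
def users_most_common_city_py (data : List (List (String × List (String × String)))) : String :=
  let cities : List String := data.foldl (fun cities u =>
    match (PySem.Dict.mk u).get? "address" with
    | none => cities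
    | some addr =>
      match (PySem.Dict.mk addr).get? "city" with
      | none => cities
      | some c => cities ++ [c]) []
  if cities = [] then ""
  else
    match PySem.List.sorted (PySem.Dict.counter cities).items (fun p => p.2) true with
    | [] => ""            -- unreachable: cities ≠ [] makes the counter nonempty
    | p :: _ => p.1

-- ===== PORT B =====
def users_most_common_city_py_alt (data : List (List (String × List (String × String)))) : String :=
  let cities : List String := data.filterMap (fun u =>
    ((PySem.Dict.mk u).get? "address").bind (fun addr => (PySem.Dict.mk addr).get? "city"))
  (cities.foldl (fun best c =>
      let n : Int := (PySem.List.count cities c : Int)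
      if n > best.2 then (c, n) else best) ("", (0 : Int))).1

-- ===== PRECONDITION & SPEC =====
def Spec_users_most_common_city_py (data : List (List (String × List (String × String)))) (out : String) : Prop := out = users_most_common_city_py_alt data
instance (data : List (List (String × List (String × String)))) (out : String) : Decidable (Spec_users_most_common_city_py data out) := by unfold Spec_users_most_common_city_py; infer_instance

-- ===== CLAIM =====
def Claim_equal_users_most_common_city_py : Prop := ∀ (data : List (List (String × List (String × String)))), Dom_users_most_common_city_py data → Spec_users_most_common_city_py data (users_most_common_city_py data)

-- ===== LEMMAS AND PROOFS =====

-- the common argmax step over city keys, in the decide form produced by the sorted fold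
def pvStep (k : String → Int) (b : String × Int) (x : String) : String × Int :=
  if decide (b.2 < k x) then (x, k x) else b

-- first-occurrence dedup of l relative to the already-seen list
def pvDed : List String → List String → List String
  | _, [] => []
  | seen, x :: xs => if x ∈ seen then pvDed seen xs else x :: pvDed (seen ++ [x]) xs

theorem pvDed_congr (l : List String) (s t : List String) (h : ∀ z, z ∈ s ↔ z ∈ t) :
    pvDed s l = pvDed t l := by
  induction l generalizing s t with
  | nil => rfl
  | cons x xs ih =>
    simp only [pvDed]
    by_cases hx : x ∈ s
    · rw [if_pos hx, if_pos ((h x).1 hx)]; exact ih s t h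
    · rw [if_neg hx, if_neg (fun hc => hx ((h x).2 hc))]
      exact congrArg (x :: ·) (ih _ _ (fun z => by simp [List.mem_append, h z]))

theorem pvStep_snd_le (k : String → Int) (b : String × Int) (x : String) :
    b.2 ≤ (pvStep k b x).2 ∧ k x ≤ (pvStep k b x).2 := by
  unfold pvStep
  by_cases h : b.2 < k x <;> simp [h] <;> omega

theorem pvDed_skip (k : String → Int) (l : List String) (seen : List String) (b : String × Int)
    (h : ∀ x ∈ seen, k x ≤ b.2) :
    l.foldl (pvStep k) b = (pvDed seen l).foldl (pvStep k) b := by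
  induction l generalizing seen b with
  | nil => rfl
  | cons x xs ih =>
    simp only [pvDed]
    by_cases hx : x ∈ seen
    · rw [if_pos hx]
      have hk : ¬ b.2 < k x := not_lt.mpr (h x hx)
      simp only [List.foldl_cons, pvStep, hk, decide_false, Bool.false_eq_true, if_neg,
        not_false_eq_true]
      exact ih seen b h
    · rw [if_neg hx]
      simp only [List.foldl_cons]
      apply ih (seen ++ [x])
      intro y hy
      rcases List.mem_append.mp hy with hy | hy
      · exact le_trans (h y hy) (pvStep_snd_le k b x).1
      · have : y = x := by simpa using hy
        subst this
        exact (pvStep_snd_le k b y).2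

theorem pvOfList_ded (l : List String) (s : List String) :
    l.foldl PySem.Set.add s = s ++ pvDed s l := by
  induction l generalizing s with
  | nil => simp [pvDed]
  | cons x xs ih =>
    simp only [List.foldl_cons, pvDed]
    by_cases hx : x ∈ s
    · have ha : PySem.Set.add s x = s := by
        simp [PySem.Set.add]; exact hx
      rw [ha, if_pos hx]; exact ih s
    · have ha : PySem.Set.add s x = s ++ [x] := by
        simp [PySem.Set.add]; exact hx
      rw [ha, if_neg hx, ih (s ++ [x])]
      simp

theorem pvDed_filter (l : List String) (seen : List String) (x : String) :
    (pvDed seen l).filter (fun y => !(y == x)) = pvDed (seen ++ [x]) l := by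
  induction l generalizing seen with
  | nil => rfl
  | cons y ys ih =>
    simp only [pvDed]
    by_cases hy : y ∈ seen
    · rw [if_pos hy, if_pos (List.mem_append_left _ hy)]; exact ih seen
    · rw [if_neg hy]
      by_cases hx : y = x
      · subst hx
        rw [if_pos (by simp)]
        simp only [List.filter_cons, beq_self_eq_true, Bool.not_true, Bool.false_eq_true,
          if_false]
        rw [ih (seen ++ [y])]
        exact pvDed_congr ys _ _ (fun z => by simp [List.mem_append, or_self])
      · rw [if_neg (by simp [hy, hx])]
        simp only [List.filter_cons, show (!(y == x)) = true by simp [hx], if_true]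
        exact congrArg (y :: ·) (by rw [ih (seen ++ [y])]
                                    exact pvDed_congr ys _ _ (fun z => by
                                      simp [List.mem_append, or_comm, or_assoc]))

-- A's city-collecting foldl is B's filterMap
theorem pvCities (data : List (List (String × List (String × String)))) (acc : List String) :
    data.foldl (fun cities u =>
      match (PySem.Dict.mk u).get? "address" with
      | none => cities
      | some addr =>
        match (PySem.Dict.mk addr).get? "city" with
        | none => cities
        | some c => cities ++ [c]) acc
    = acc ++ data.filterMap (fun u =>
        ((PySem.Dict.mk u).get? "address").bind (fun addr => (PySem.Dict.mk addr).get? "city")) := by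
  induction data generalizing acc with
  | nil => simp
  | cons u rest ih =>
    simp only [List.foldl_cons, List.filterMap_cons]
    rcases h : (PySem.Dict.mk u).get? "address" with _ | addr
    · simpa using ih acc
    · rcases h2 : (PySem.Dict.mk addr).get? "city" with _ | c
      · simp only [h2, Option.bind_some]; simpa using ih acc
      · simp only [h2, Option.bind_some]
        rw [ih (acc ++ [c])]; simp

theorem pvInsHead {α : Type} (bef : α → α → Bool) (ps : List α) (h : α) (t : List α) :
    ∃ t', ps.foldl (fun acc x => PySem.List.insertBy bef x acc) (h :: t)
      = (ps.foldl (fun b x => if bef x b then x else b) h) :: t' := by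
  induction ps generalizing h t with
  | nil => exact ⟨t, rfl⟩
  | cons x rest ih =>
    simp only [List.foldl_cons]
    by_cases hb : bef x h
    · have : PySem.List.insertBy bef x (h :: t) = x :: h :: t := by
        simp [PySem.List.insertBy, hb]
      rw [this, if_pos hb]; exact ih x (h :: t)
    · have : PySem.List.insertBy bef x (h :: t) = h :: PySem.List.insertBy bef x t := by
        simp [PySem.List.insertBy, hb]
      rw [this, if_neg hb]; exact ih h _

-- head of the reverse stable sort of a nonempty list = first strict-max fold
theorem pvSortedHead {α : Type} [Inhabited α] (key : α → Int) (q : α) (rest : List α) :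
    ∃ t', PySem.List.sorted (q :: rest) key true
      = (rest.foldl (fun b x => if decide (key b < key x) then x else b) q) :: t' := by
  rw [PySem.List.sorted_rev_eq_foldl_insertBy]
  simp only [List.foldl_cons]
  have h1 : PySem.List.insertBy (fun a b => decide (key b < key a)) q [] = [q] := rfl
  rw [h1]
  exact pvInsHead _ rest q []

-- the core equality on the collected city list (nonempty case)
theorem pvMain (c : String) (cs : List String) :
    (match PySem.List.sorted (PySem.Dict.counter (c :: cs)).items (fun p => p.2) true with
      | [] => ""
      | p :: _ => p.1)
    = ((c :: cs).foldl (fun best x =>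
        let n : Int := (PySem.List.count (c :: cs) x : Int)
        if n > best.2 then (x, n) else best) ("", (0 : Int))).1 := by
  have hB : (fun (best : String × Int) (x : String) =>
      let n : Int := (PySem.List.count (c :: cs) x : Int)
      if n > best.2 then (x, n) else best)
      = pvStep (fun x => (List.count x (c :: cs) : Int)) := by
    funext b x
    by_cases h : b.2 < (List.count x (c :: cs) : Int) <;>
      simp [pvStep, PySem.List.count_eq, gt_iff_lt, h]
  rw [hB]
  rw [PySem.Dict.items_counter, PySem.Set.ofList_cons, List.map_cons]
  obtain ⟨t', hs⟩ := pvSortedHead (fun p : String × Int => p.2)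
    (c, (List.count c (c :: cs) : Int))
    (((PySem.Set.ofList cs).discard c).map (fun k => (k, (List.count k (c :: cs) : Int))))
  rw [hs]
  simp only [List.foldl_map]
  have hfirst : pvStep (fun x => (List.count x (c :: cs) : Int)) ("", (0 : Int)) c
      = (c, (List.count c (c :: cs) : Int)) := by
    simp [pvStep]
  rw [List.foldl_cons, hfirst]
  have hded : (PySem.Set.ofList cs).discard c = pvDed [c] cs := by
    have h1 : PySem.Set.ofList cs = pvDed [] cs := by
      rw [PySem.Set.ofList_eq_foldl, pvOfList_ded cs []]; rfl
    rw [h1]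
    show (pvDed [] cs).filter (fun y => !(y == c)) = pvDed [c] cs
    exact pvDed_filter cs [] c
  rw [hded, pvDed_skip (fun x => (List.count x (c :: cs) : Int)) cs [c]
    (c, (List.count c (c :: cs) : Int)) (by intro y hy; simp at hy; subst hy; exact le_rfl)]
  rfl

-- ===== VERDICT (by name: the statement is the Claim_ definition above) =====
theorem users_most_common_city_py_spec : Claim_equal_users_most_common_city_py := by
  intro data _
  unfold Spec_users_most_common_city_py users_most_common_city_py users_most_common_city_py_alt
  rw [pvCities data [], List.nil_append]
  cases hFM : data.filterMap (fun u =>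
      ((PySem.Dict.mk u).get? "address").bind (fun addr => (PySem.Dict.mk addr).get? "city")) with
  | nil => rfl
  | cons c cs =>
    have hne : (c :: cs) ≠ ([] : List String) := by simp
    simpa [hne] using pvMain c cs
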